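-- pv_equiv track=rewrite | github.com/comprehensive9/vendor_qcom_proprietary | commonsys-intf/QIIFA-fwk/test_framework/utils.py | ver_dict_to_lst
-- ===== SOURCE A (Python) =====
-- def ver_dict_to_lst(ver_dict):
--     """Converts from a version dict to a version list."""
--     ver_lst = []
--     for major, minor_lst in ver_dict.items():
--
--         # Continue to the next major ver if no minor ver within the list
--         if len(minor_lst) == 0:
--             continue
--
--         start = minor_lst[0]
--         end = start
--         for i in range(1, len(minor_lst)):
--             next_num = minor_lst[i]
--             if end + 1 == next_num:
--                 end += 1
--             else:
--                 combined = major + '.' + str(start)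
--                 if start != end:
--                     combined += '-' + str(end)
--                 ver_lst.append(combined)
--                 start = next_num
--                 end = start
--
--         # Add the very last version string that wasn't added within loop
--         combined = major + '.' + str(start)
--         if start != end:
--             combined += '-' + str(end)
--         ver_lst.append(combined)
--     return ver_lst
-- ===== SOURCE B (Python) =====
-- def ver_dict_to_lst(ver_dict):
--     """Converts from a version dict to a version list."""
--     out = []
--     for major, minors in ver_dict.items():
--         runs = []  # (start, end) runs, collected in reverse order
--         for x in reversed(minors):
--             if runs and runs[-1][0] == x + 1:
--                 runs[-1] = (x, runs[-1][1])
--             else: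
--                 runs.append((x, x))
--         for s, e in reversed(runs):
--             out.append(major + '.' + str(s) + ('-' + str(e) if s != e else ''))
--     return out
-- ===== Notes on version B (the rewrite author's own statement) =====
-- stated objective: alternative
-- what changed: B walks each minor list backwards, merging each element into the front of the already-built following run (the run list is kept in reverse and emitted reversed), instead of A's forward start/end state machine with in-loop flushes.
import Mathlib
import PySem

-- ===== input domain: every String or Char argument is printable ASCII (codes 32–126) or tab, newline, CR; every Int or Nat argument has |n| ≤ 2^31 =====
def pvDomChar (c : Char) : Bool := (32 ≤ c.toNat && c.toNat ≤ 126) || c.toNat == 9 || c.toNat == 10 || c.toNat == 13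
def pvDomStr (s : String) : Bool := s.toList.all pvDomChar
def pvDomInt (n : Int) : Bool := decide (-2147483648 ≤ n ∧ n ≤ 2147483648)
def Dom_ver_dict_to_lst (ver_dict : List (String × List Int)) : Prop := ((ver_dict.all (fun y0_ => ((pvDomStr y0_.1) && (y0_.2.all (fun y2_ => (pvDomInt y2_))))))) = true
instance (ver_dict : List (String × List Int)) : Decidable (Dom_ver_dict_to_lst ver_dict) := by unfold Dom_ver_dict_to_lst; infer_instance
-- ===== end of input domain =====

-- B replaces A's forward start/end state machine by a backward traversal of each minor list
-- that merges each element into the front of the already-built following run (alternative; same cost).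

-- ===== PORT A =====
-- combined = major + '.' + str(start); if start != end: combined += '-' + str(end)
def pvCombineA (major : String) (start e : Int) : String :=
  let combined := major ++ "." ++ PySem.Int.toStr start
  if start ≠ e then combined ++ "-" ++ PySem.Int.toStr e else combined

-- A's inner loop over minor_lst[1:], carrying start/end and the accumulator; on exit the
-- last pending run is appended (the code after the loop).
def pvLoopA (major : String) (start e : Int) (acc : List String) : List Int → List String
  | [] => acc ++ [pvCombineA major start e]
  | next_num :: rest =>
      if e + 1 = next_num then pvLoopA major start (e + 1) acc rest
      else pvLoopA major next_num next_num (acc ++ [pvCombineA major start e]) rest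

-- one iteration of A's outer loop: skip empty minor lists, else run the inner loop
def pvEntryA (major : String) (minors : List Int) (ver_lst : List String) : List String :=
  match minors with
  | [] => ver_lst              -- continue on empty minor list
  | m :: rest => pvLoopA major m m ver_lst rest

def ver_dict_to_lst (ver_dict : List (String × List Int)) : List String :=
  ver_dict.foldl (fun ver_lst p => pvEntryA p.1 p.2 ver_lst) []

-- ===== PORT B =====
-- one step of B's backward loop: if runs and runs[-1][0] == x + 1: runs[-1] = (x, runs[-1][1])
-- else: runs.append((x, x))   (runs is kept in reverse order, so its last entry is the front run)
def pvRunsStep (runs : List (Int × Int)) (x : Int) : List (Int × Int) :=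
  match runs.getLast? with
  | some se => if se.1 = x + 1 then runs.dropLast ++ [(x, se.2)] else runs ++ [(x, x)]
  | none => runs ++ [(x, x)]

def pvFmtB (major : String) (se : Int × Int) : String :=
  major ++ "." ++ PySem.Int.toStr se.1 ++
    (if se.1 ≠ se.2 then "-" ++ PySem.Int.toStr se.2 else "")

def ver_dict_to_lst_alt (ver_dict : List (String × List Int)) : List String :=
  ver_dict.foldl
    (fun out p =>
      out ++ ((p.2.reverse.foldl pvRunsStep []).reverse.map (pvFmtB p.1))) []

-- ===== PRECONDITION & SPEC =====
def Spec_ver_dict_to_lst (ver_dict : List (String × List Int)) (out : List String) : Prop := out = ver_dict_to_lst_alt ver_dict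
instance (ver_dict : List (String × List Int)) (out : List String) : Decidable (Spec_ver_dict_to_lst ver_dict out) := by unfold Spec_ver_dict_to_lst; infer_instance

-- ===== CLAIM (what is proved, stated in full; the proofs are below) =====
def Claim_equal_ver_dict_to_lst : Prop := ∀ (ver_dict : List (String × List Int)), Dom_ver_dict_to_lst ver_dict → Spec_ver_dict_to_lst ver_dict (ver_dict_to_lst ver_dict)

-- ===== LEMMAS AND PROOFS =====

-- Common characterisation: the (start, end) runs of a list, built by prepending/merging at the front.
def pvMerge (se : Int × Int) : List (Int × Int) → List (Int × Int)
  | [] => [se]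
  | (s', e') :: t => if s' = se.2 + 1 then (se.1, e') :: t else se :: (s', e') :: t

def pvRunsF : List Int → List (Int × Int)
  | [] => []
  | x :: rest => pvMerge (x, x) (pvRunsF rest)

-- A's formatter equals B's formatter.
theorem pvFmt_eq (major : String) (s e : Int) :
    pvCombineA major s e = pvFmtB major (s, e) := by
  simp only [pvCombineA, pvFmtB]
  split_ifs
  · simp [String.append_assoc]
  · simp

-- A's inner loop computes the runs of the remaining list merged with the pending run.
theorem pvLoopA_eq (major : String) :
    ∀ (rest : List Int) (s e : Int) (acc : List String),
    pvLoopA major s e acc rest = acc ++ (pvMerge (s, e) (pvRunsF rest)).map (pvFmtB major) := by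
  intro rest
  induction rest with
  | nil =>
    intro s e acc
    simp [pvLoopA, pvRunsF, pvMerge, pvFmt_eq]
  | cons n rest' ih =>
    intro s e acc
    by_cases hk : e + 1 = n
    · rw [pvLoopA, if_pos hk, ih s (e + 1) acc]
      congr 2
      symm
      show pvMerge (s, e) (pvRunsF (n :: rest')) = pvMerge (s, e + 1) (pvRunsF rest')
      rw [pvRunsF]
      rcases hr : pvRunsF rest' with _ | ⟨⟨s', e'⟩, t⟩
      · simp [pvMerge, hk]
      · by_cases h2 : s' = n + 1 <;> simp [pvMerge, h2, hk]
    · rw [pvLoopA, if_neg hk, ih n n (acc ++ [pvCombineA major s e])]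
      rw [List.append_assoc]
      congr 1
      show _ = (pvMerge (s, e) (pvRunsF (n :: rest'))).map (pvFmtB major)
      rw [pvRunsF]
      have hhead : ∃ E t, pvMerge (n, n) (pvRunsF rest') = (n, E) :: t := by
        rcases pvRunsF rest' with _ | ⟨⟨s', e'⟩, t⟩
        · exact ⟨n, [], rfl⟩
        · by_cases h2 : s' = n + 1
          · exact ⟨e', t, by simp [pvMerge, h2]⟩
          · exact ⟨n, (s', e') :: t, by simp [pvMerge, h2]⟩
      obtain ⟨E, t, h⟩ := hhead
      rw [h]
      have hne : ¬ (n = e + 1) := fun h' => hk h'.symm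
      simp [pvMerge, hne, pvFmt_eq]
  
-- per-entry agreement of A with pvRunsF
theorem pvEntryA_eq (major : String) (minors : List Int) (acc : List String) :
    pvEntryA major minors acc = acc ++ (pvRunsF minors).map (pvFmtB major) := by
  cases minors with
  | nil => simp [pvEntryA, pvRunsF]
  | cons m rest => rw [pvEntryA, pvLoopA_eq major rest m m acc, pvRunsF]

-- B's backward loop builds exactly the reversed runs.
theorem pvRunsB_eq (l : List Int) :
    l.reverse.foldl pvRunsStep [] = (pvRunsF l).reverse := by
  induction l with
  | nil => simp [pvRunsF]
  | cons x rest ih =>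
    rw [List.reverse_cons, List.foldl_append, ih]
    simp only [List.foldl_cons, List.foldl_nil, pvRunsF]
    rcases pvRunsF rest with _ | ⟨⟨s', e'⟩, t⟩
    · simp [pvRunsStep, pvMerge]
    · by_cases h2 : s' = x + 1 <;>
        simp [pvRunsStep, pvMerge, h2, List.getLast?_reverse]

-- Fold with per-entry append equals the same fold on A's side.
theorem pvFold_eq (l : List (String × List Int)) :
    ∀ acc : List String,
    l.foldl (fun ver_lst p => pvEntryA p.1 p.2 ver_lst) acc =
    l.foldl (fun out p => out ++ ((p.2.reverse.foldl pvRunsStep []).reverse.map (pvFmtB p.1))) acc := by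
  induction l with
  | nil => intro acc; rfl
  | cons p l' ih =>
    intro acc
    simp only [List.foldl_cons]
    rw [pvEntryA_eq p.1 p.2 acc, pvRunsB_eq p.2, List.reverse_reverse, ih]

-- ===== VERDICT (by name: the statement is the Claim_ definition above) =====
theorem ver_dict_to_lst_spec : Claim_equal_ver_dict_to_lst := by
  intro ver_dict _
  unfold Spec_ver_dict_to_lst ver_dict_to_lst ver_dict_to_lst_alt
  exact pvFold_eq ver_dict []
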